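-- pv_equiv track=rewrite | github.com/apurva9808/prompt-project | api.py | _skills_match_offline
-- ===== SOURCE A (Python) =====
-- _STOP_TOKENS = {
--     "and", "or", "of", "in", "the", "with", "a", "an", "to", "for",
--     "is", "are", "as", "at", "be", "by", "on", "it", "its", "that",
--     "this", "from", "have", "has", "was", "were", "not", "but",
-- }
--
-- _GENERIC_TOKENS = {
--     "experience", "knowledge", "skills", "skill", "ability", "use",
--     "using", "work", "working", "strong", "good", "basic", "standard",
--     "general", "various", "related", "including", "such", "other",
--     "well", "ability", "demonstrated", "proven",
-- }
--
-- def _meaningful_tokens(phrase: str) -> set[str]: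
--     """Return tokens from a phrase that are meaningful for matching."""
--     return {
--         t for t in phrase.lower().split()
--         if len(t) > 2 and t not in _STOP_TOKENS and t not in _GENERIC_TOKENS
--     }
--
-- def _skills_match_offline(job_skill: str, resume_set: set[str]) -> bool:
--     """Strict offline matching: exact, containment, or meaningful-token overlap."""
--     js = job_skill.lower().strip()
--     for rs in resume_set:
--         r = rs.lower().strip()
--         if js == r:
--             return True
--         # Only allow containment when the shorter string is specific (>= 4 chars, not generic)
--         shorter, longer = (js, r) if len(js) <= len(r) else (r, js)
--         if len(shorter) >= 4 and shorter not in _GENERIC_TOKENS and shorter in longer: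
--             return True
--         # Token overlap: require at least 1 meaningful shared token that is domain-specific
--         # (length >= 4 to avoid false positives on short common words)
--         js_tokens = {t for t in _meaningful_tokens(js) if len(t) >= 4}
--         rs_tokens = {t for t in _meaningful_tokens(r) if len(t) >= 4}
--         if js_tokens and rs_tokens and js_tokens & rs_tokens:
--             return True
--     return False
-- ===== SOURCE B (Python) =====
-- _STOP_TOKENS = {
--     "and", "or", "of", "in", "the", "with", "a", "an", "to", "for",
--     "is", "are", "as", "at", "be", "by", "on", "it", "its", "that",
--     "this", "from", "have", "has", "was", "were", "not", "but",
-- }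
--
-- _GENERIC_TOKENS = {
--     "experience", "knowledge", "skills", "skill", "ability", "use",
--     "using", "work", "working", "strong", "good", "basic", "standard",
--     "general", "various", "related", "including", "such", "other",
--     "well", "ability", "demonstrated", "proven",
-- }
--
-- def _meaningful_tokens(phrase: str) -> set[str]:
--     return {
--         t for t in phrase.lower().split()
--         if len(t) > 2 and t not in _STOP_TOKENS and t not in _GENERIC_TOKENS
--     }
--
-- def _contains_ok(js: str, r: str) -> bool:
--     shorter, longer = (js, r) if len(js) <= len(r) else (r, js)
--     return len(shorter) >= 4 and shorter not in _GENERIC_TOKENS and shorter in longer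
--
-- def _skills_match_offline(job_skill: str, resume_set: set[str]) -> bool:
--     js = job_skill.lower().strip()
--     normalized = [rs.lower().strip() for rs in resume_set]
--     # pass 1: exact match via a set lookup
--     if js in set(normalized):
--         return True
--     # pass 2: specific-substring containment
--     if any(_contains_ok(js, r) for r in normalized):
--         return True
--     # pass 3: meaningful-token overlap (job tokens computed once)
--     js_tokens = {t for t in _meaningful_tokens(js) if len(t) >= 4}
--     return bool(js_tokens) and any(
--         js_tokens & {t for t in _meaningful_tokens(r) if len(t) >= 4}
--         for r in normalized
--     )
-- ===== Notes on version B (the rewrite author's own statement) =====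
-- stated objective: simpler
-- what changed: Replaces A's single loop that re-derives the loop-invariant job token set and runs all three checks per element with three separate short passes: a set-membership exact check, an any() containment pass, and a token-overlap pass with the job token set computed once; correct because the boolean 'any element passes any check' decomposes into 'any pass finds a match'.
import Mathlib
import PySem

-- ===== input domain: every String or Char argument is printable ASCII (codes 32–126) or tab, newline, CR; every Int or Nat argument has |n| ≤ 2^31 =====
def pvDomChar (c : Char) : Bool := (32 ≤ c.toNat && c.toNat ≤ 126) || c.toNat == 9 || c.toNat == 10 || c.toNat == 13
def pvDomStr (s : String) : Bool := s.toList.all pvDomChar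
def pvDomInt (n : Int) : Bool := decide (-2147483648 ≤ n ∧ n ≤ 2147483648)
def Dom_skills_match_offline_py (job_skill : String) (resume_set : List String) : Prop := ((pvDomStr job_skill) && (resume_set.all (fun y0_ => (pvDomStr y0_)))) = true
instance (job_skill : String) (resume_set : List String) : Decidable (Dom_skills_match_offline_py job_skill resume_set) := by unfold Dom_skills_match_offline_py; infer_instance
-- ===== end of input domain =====

-- B restructures A's single three-check loop into three separate passes (set lookup, containment pass,
-- token-overlap pass with the job token set computed once); objective: simpler.


-- ===== PORT A =====
def pvStopTokens : List String :=
  ["and", "or", "of", "in", "the", "with", "a", "an", "to", "for",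
   "is", "are", "as", "at", "be", "by", "on", "it", "its", "that",
   "this", "from", "have", "has", "was", "were", "not", "but"]

def pvGenericTokens : List String :=
  ["experience", "knowledge", "skills", "skill", "ability", "use",
   "using", "work", "working", "strong", "good", "basic", "standard",
   "general", "various", "related", "including", "such", "other",
   "well", "demonstrated", "proven"]

-- _meaningful_tokens: set comprehension over phrase.lower().split()
def pvMeaningfulTokens (phrase : String) : PySem.Set String :=
  PySem.Set.ofList ((PySem.Str.split₀ (PySem.Str.lower phrase)).filter
    (fun t => decide (2 < t.length) && !(pvStopTokens.contains t) && !(pvGenericTokens.contains t)))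

-- A's for-loop over resume_set, step for step
def pvAGo (js : String) (l : List String) : Bool :=
  match l with
  | [] => false
  | rs :: rest =>
    let r := PySem.Str.strip (PySem.Str.lower rs)
    if js == r then true
    else
      let shorter := if js.length ≤ r.length then js else r
      let longer  := if js.length ≤ r.length then r else js
      if decide (4 ≤ shorter.length) && !(pvGenericTokens.contains shorter) && PySem.Str.isIn shorter longer then true
      else
        let jsTok := (pvMeaningfulTokens js).filter (fun t => decide (4 ≤ t.length))
        let rsTok := (pvMeaningfulTokens r).filter (fun t => decide (4 ≤ t.length))
        if !jsTok.isEmpty && !rsTok.isEmpty && !(PySem.Set.inter jsTok rsTok).isEmpty then true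
        else pvAGo js rest

def skills_match_offline_py (job_skill : String) (resume_set : List String) : Bool :=
  pvAGo (PySem.Str.strip (PySem.Str.lower job_skill)) resume_set

-- ===== PORT B =====
def pvContainOK (js r : String) : Bool :=
  let shorter := if js.length ≤ r.length then js else r
  let longer  := if js.length ≤ r.length then r else js
  decide (4 ≤ shorter.length) && !(pvGenericTokens.contains shorter) && PySem.Str.isIn shorter longer

def skills_match_offline_py_alt (job_skill : String) (resume_set : List String) : Bool :=
  let js := PySem.Str.strip (PySem.Str.lower job_skill)
  let normalized := resume_set.map (fun rs => PySem.Str.strip (PySem.Str.lower rs))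
  if PySem.Set.contains (PySem.Set.ofList normalized) js then true
  else if normalized.any (fun r => pvContainOK js r) then true
  else
    let jsTok := (pvMeaningfulTokens js).filter (fun t => decide (4 ≤ t.length))
    !jsTok.isEmpty && normalized.any (fun r =>
      !(PySem.Set.inter jsTok ((pvMeaningfulTokens r).filter (fun t => decide (4 ≤ t.length)))).isEmpty)

-- ===== PRECONDITION & SPEC =====
def Spec_skills_match_offline_py (job_skill : String) (resume_set : List String) (out : Bool) : Prop := out = skills_match_offline_py_alt job_skill resume_set
instance (job_skill : String) (resume_set : List String) (out : Bool) : Decidable (Spec_skills_match_offline_py job_skill resume_set out) := by unfold Spec_skills_match_offline_py; infer_instance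

-- ===== CLAIM (what is proved, stated in full; the proofs are below) =====
def Claim_equal_skills_match_offline_py : Prop := ∀ (job_skill : String) (resume_set : List String), Dom_skills_match_offline_py job_skill resume_set → Spec_skills_match_offline_py job_skill resume_set (skills_match_offline_py job_skill resume_set)

-- ===== LEMMAS AND PROOFS =====

-- the per-element disjunction A's loop checks
def pvCheck (js r : String) : Bool :=
  (js == r) || pvContainOK js r ||
    (let jsTok := (pvMeaningfulTokens js).filter (fun t => decide (4 ≤ t.length))
     let rsTok := (pvMeaningfulTokens r).filter (fun t => decide (4 ≤ t.length))
     !jsTok.isEmpty && !rsTok.isEmpty && !(PySem.Set.inter jsTok rsTok).isEmpty)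

lemma pvIf3 (a b c x : Bool) :
    (if a then true else if b then true else if c then true else x) = ((a || b || c) || x) := by
  cases a <;> cases b <;> cases c <;> cases x <;> rfl

lemma pvAGo_eq_any (js : String) (l : List String) :
    pvAGo js l = l.any (fun rs => pvCheck js (PySem.Str.strip (PySem.Str.lower rs))) := by
  induction l with
  | nil => rfl
  | cons rs rest ih =>
    rw [List.any_cons, ← ih]
    simp only [pvAGo]
    rw [pvIf3]
    rfl

-- a nonempty intersection forces the second operand nonempty
lemma pvInter_nonempty_right {a b : List String} (h : ¬ (PySem.Set.inter a b).isEmpty = true) :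
    ¬ b.isEmpty = true := by
  intro hb
  apply h
  cases b with
  | nil =>
    simp only [PySem.Set.inter, PySem.Set.contains]
    simp
  | cons x xs => simp at hb

theorem skills_match_offline_py_spec' (job_skill : String) (resume_set : List String) :
    skills_match_offline_py job_skill resume_set = skills_match_offline_py_alt job_skill resume_set := by
  unfold skills_match_offline_py skills_match_offline_py_alt
  rw [pvAGo_eq_any]
  set js := PySem.Str.strip (PySem.Str.lower job_skill) with hjs
  have hmem : PySem.Set.contains (PySem.Set.ofList (resume_set.map (fun rs => PySem.Str.strip (PySem.Str.lower rs)))) js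
      = resume_set.any (fun rs => js == PySem.Str.strip (PySem.Str.lower rs)) := by
    rw [Bool.eq_iff_iff]
    simp only [PySem.Set.contains_iff, PySem.Set.mem_ofList, List.any_eq_true, beq_iff_eq,
      List.mem_map]
    constructor
    · rintro ⟨r, hr, h⟩; exact ⟨r, hr, h.symm⟩
    · rintro ⟨r, hr, h⟩; exact ⟨r, hr, h.symm⟩
  simp only [hmem, List.any_map, Function.comp_def]
  cases he : resume_set.any (fun rs => js == PySem.Str.strip (PySem.Str.lower rs)) with
  | true =>
    rw [if_pos rfl]
    obtain ⟨rs, hrs, hb⟩ := List.any_eq_true.1 he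
    refine List.any_eq_true.2 ⟨rs, hrs, ?_⟩
    simp [pvCheck, hb]
  | false =>
    simp only [Bool.false_eq_true, if_false]
    cases hc : resume_set.any (fun rs => pvContainOK js (PySem.Str.strip (PySem.Str.lower rs))) with
    | true =>
      rw [if_pos rfl]
      obtain ⟨rs, hrs, hb⟩ := List.any_eq_true.1 hc
      refine List.any_eq_true.2 ⟨rs, hrs, ?_⟩
      simp [pvCheck, hb]
    | false =>
      simp only [Bool.false_eq_true, if_false]
      have he' := List.any_eq_false.1 he
      have hc' := List.any_eq_false.1 hc
      cases hres : (resume_set.any (fun rs => pvCheck js (PySem.Str.strip (PySem.Str.lower rs)))) with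
      | true =>
        obtain ⟨rs, hrs, hb⟩ := List.any_eq_true.1 hres
        have h1 := he' rs hrs
        have h2 := hc' rs hrs
        simp only [pvCheck, h1, h2, Bool.false_or] at hb
        simp only [Bool.and_eq_true, Bool.not_eq_true'] at hb
        symm
        simp only [Bool.and_eq_true, List.any_eq_true]
        refine ⟨?_, ⟨rs, hrs, ?_⟩⟩
        · simp [hb.1.1]
        · simp [hb.2]
      | false =>
        have hres' := List.any_eq_false.1 hres
        symm
        rw [Bool.and_eq_false_iff]
        by_cases hjt : ((pvMeaningfulTokens js).filter (fun t => decide (4 ≤ t.length))).isEmpty = true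
        · left; rw [hjt]; rfl
        · right
          rw [List.any_eq_false]
          intro rs hrs
          have hch : pvCheck js (PySem.Str.strip (PySem.Str.lower rs)) = false := by
            cases h : pvCheck js (PySem.Str.strip (PySem.Str.lower rs))
            · rfl
            · exact absurd h (hres' rs hrs)
          simp only [pvCheck, Bool.or_eq_false_iff] at hch
          obtain ⟨-, h3⟩ := hch
          have haE : ((pvMeaningfulTokens js).filter (fun t => decide (4 ≤ t.length))).isEmpty = false := by
            cases h : ((pvMeaningfulTokens js).filter (fun t => decide (4 ≤ t.length))).isEmpty
            · rfl
            · exact absurd h hjt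
          intro hI
          have hiE : (PySem.Set.inter ((pvMeaningfulTokens js).filter (fun t => decide (4 ≤ t.length))) ((pvMeaningfulTokens (PySem.Str.strip (PySem.Str.lower rs))).filter (fun t => decide (4 ≤ t.length)))).isEmpty = false := by simpa using hI
          have hbE : ((pvMeaningfulTokens (PySem.Str.strip (PySem.Str.lower rs))).filter (fun t => decide (4 ≤ t.length))).isEmpty = false := by
            have hne := pvInter_nonempty_right (a := ((pvMeaningfulTokens js).filter (fun t => decide (4 ≤ t.length)))) (b := ((pvMeaningfulTokens (PySem.Str.strip (PySem.Str.lower rs))).filter (fun t => decide (4 ≤ t.length)))) (by simp [hiE])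
            cases h : ((pvMeaningfulTokens (PySem.Str.strip (PySem.Str.lower rs))).filter (fun t => decide (4 ≤ t.length))).isEmpty
            · rfl
            · exact absurd h hne
          simp [haE, hbE, hiE] at h3

-- ===== VERDICT (by name: the statement is the Claim_ definition above) =====
theorem skills_match_offline_py_spec : Claim_equal_skills_match_offline_py := by
  intro job_skill resume_set _
  exact skills_match_offline_py_spec' job_skill resume_set
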